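-- pv_equiv track=rewrite | github.com/allen-proxmire/emergence-universe | ED-SIM-Code/Reproduce_This_Law/Law_IV_Tangent_Fragmentation/run_law_IV.py | count_ic_bands
-- ===== SOURCE A (Python) =====
-- def count_ic_bands(records):
--     """Count contiguous runs of inward-collapse mechanism."""
--     bands = 0
--     in_ic = False
--     max_width = 0
--     current_width = 0
--     for r in records:
--         if r["mechanism"] == "inward-collapse":
--             if not in_ic:
--                 bands += 1
--                 in_ic = True
--                 current_width = 1
--             else:
--                 current_width += 1
--         else:
--             if in_ic:
--                 max_width = max(max_width, current_width)
--                 in_ic = False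
--                 current_width = 0
--     if in_ic:
--         max_width = max(max_width, current_width)
--     return bands, max_width
-- ===== SOURCE B (Python) =====
-- def count_ic_bands(records):
--     """Count contiguous runs of inward-collapse mechanism."""
--     flags = [r["mechanism"] == "inward-collapse" for r in records]
--     widths = []
--     i, n = 0, len(flags)
--     while i < n:
--         if flags[i]:
--             j = i + 1
--             while j < n and flags[j]:
--                 j += 1
--             widths.append(j - i)
--             i = j
--         else:
--             i += 1
--     return len(widths), max(widths, default=0)
-- ===== Notes on version B (the rewrite author's own statement) =====
-- stated objective: alternative
-- what changed: B replaces A's inline four-variable state machine with a two-phase shape: first compute the boolean flag list, then scan it with index jumps extracting each maximal True-run's width into a list, finally returning (len(widths), max(widths, default=0)); Pre_ excludes records lacking the 'mechanism' key, on which both A and B raise KeyError.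
import Mathlib
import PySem

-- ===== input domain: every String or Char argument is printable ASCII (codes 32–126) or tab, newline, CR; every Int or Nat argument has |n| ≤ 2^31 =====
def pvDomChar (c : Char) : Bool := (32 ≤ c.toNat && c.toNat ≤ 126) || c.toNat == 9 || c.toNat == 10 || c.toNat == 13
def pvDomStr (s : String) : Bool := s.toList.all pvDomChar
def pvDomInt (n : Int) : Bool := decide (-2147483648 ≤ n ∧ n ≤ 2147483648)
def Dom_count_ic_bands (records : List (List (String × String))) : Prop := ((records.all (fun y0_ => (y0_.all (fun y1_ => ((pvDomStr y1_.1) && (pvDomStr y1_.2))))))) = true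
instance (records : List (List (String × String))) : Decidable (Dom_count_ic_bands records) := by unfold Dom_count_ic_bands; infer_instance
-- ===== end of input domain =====

-- B replaces A's inline four-variable state machine with a two-phase run-extraction; same O(n) cost.
-- Pre_ excludes records lacking the "mechanism" key, on which the Python A raises KeyError.

-- ===== PORT A =====
-- r["mechanism"] is ported as (Dict.mk r).getD "mechanism" "" — exact under Pre_ (key present; Python raises otherwise)
def count_ic_bands (records : List (List (String × String))) : Int × Int :=
  let s := records.foldl (fun (st : Int × Bool × Int × Int) r =>
    let (bands, in_ic, max_width, current_width) := st
    if (PySem.Dict.mk r).getD "mechanism" "" == "inward-collapse" then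
      if !in_ic then (bands + 1, true, max_width, 1)
      else (bands, in_ic, max_width, current_width + 1)
    else
      if in_ic then (bands, false, max max_width current_width, 0)
      else st) (0, false, 0, 0)
  (s.1, if s.2.1 then max s.2.2.1 s.2.2.2 else s.2.2.1)

-- ===== PORT B =====
def icFlag (r : List (String × String)) : Bool :=
  (PySem.Dict.mk r).getD "mechanism" "" == "inward-collapse"

-- Source B's index loop over flags, as recursion on the suffix: a True at the front yields
-- the run width (inner while j = takeWhile) and jumps past the run (i = j = dropWhile)
def widthsOf : List Bool → List Int
  | [] => []
  | false :: rest => widthsOf rest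
  | true :: rest =>
      (1 + ((rest.takeWhile (· == true)).length : Int)) :: widthsOf (rest.dropWhile (· == true))
  termination_by l => l.length
  decreasing_by
    · simp
    · simpa using Nat.lt_succ_of_le (List.length_dropWhile_le _ _)

def count_ic_bands_alt (records : List (List (String × String))) : Int × Int :=
  let widths := widthsOf (records.map icFlag)
  ((widths.length : Int), (PySem.List.max? widths (fun x => x)).getD 0)

-- ===== PRECONDITION & SPEC =====
-- Pre_: every record dict has the key "mechanism" (Python A raises KeyError otherwise)
def Pre_count_ic_bands (records : List (List (String × String))) : Prop :=
  ∀ r ∈ records, ((PySem.Dict.mk r).get? "mechanism").isSome = true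
instance (records : List (List (String × String))) : Decidable (Pre_count_ic_bands records) := by unfold Pre_count_ic_bands; infer_instance
def pvWitness_count_ic_bands : (List (List (String × String))) :=
  [[("mechanism", "inward-collapse")], [("mechanism", "outward")], [("mechanism", "inward-collapse")]]

def Spec_count_ic_bands (records : List (List (String × String))) (out : Int × Int) : Prop := out = count_ic_bands_alt records
instance (records : List (List (String × String))) (out : Int × Int) : Decidable (Spec_count_ic_bands records out) := by unfold Spec_count_ic_bands; infer_instance

-- ===== CLAIM (what is proved, stated in full; the proofs are below) =====
def Claim_equal_count_ic_bands : Prop := ∀ (records : List (List (String × String))), Dom_count_ic_bands records → Pre_count_ic_bands records → Spec_count_ic_bands records (count_ic_bands records)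

-- ===== LEMMAS AND PROOFS =====

-- A's loop body on the flag alone
def stepA (st : Int × Bool × Int × Int) (f : Bool) : Int × Bool × Int × Int :=
  let (bands, in_ic, max_width, current_width) := st
  if f then
    if !in_ic then (bands + 1, true, max_width, 1)
    else (bands, in_ic, max_width, current_width + 1)
  else
    if in_ic then (bands, false, max max_width current_width, 0)
    else st

def goA (st : Int × Bool × Int × Int) (flags : List Bool) : Int × Int :=
  let s := flags.foldl stepA st
  (s.1, if s.2.1 then max s.2.2.1 s.2.2.2 else s.2.2.1)

theorem count_ic_bands_eq_goA (records : List (List (String × String))) :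
    count_ic_bands records = goA (0, false, 0, 0) (records.map icFlag) := by
  simp [count_ic_bands, goA, List.foldl_map, stepA, icFlag]

theorem goA_in_run (flags : List Bool) : ∀ (b m c : Int),
    goA (b, true, m, c) flags =
      goA (b, false, max m (c + ((flags.takeWhile (· == true)).length : Int)), 0)
        (flags.dropWhile (· == true)) := by
  induction flags with
  | nil => intro b m c; simp [goA, List.foldl]
  | cons f rest ih =>
    intro b m c
    cases f with
    | true =>
      have h := ih b m (c + 1)
      have e1 : goA (b, true, m, c) (true :: rest) = goA (b, true, m, c + 1) rest := by
        simp [goA, List.foldl, stepA]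
      rw [e1, h]
      have e2 : ((true :: rest).takeWhile (· == true)) = true :: rest.takeWhile (· == true) := by simp
      have e3 : ((true :: rest).dropWhile (· == true)) = rest.dropWhile (· == true) := by simp
      rw [e2, e3]
      have e4 : c + 1 + ((rest.takeWhile (· == true)).length : Int)
          = c + (((true :: rest.takeWhile (· == true)).length : Nat) : Int) := by
        simp only [List.length_cons]; push_cast; ring
      rw [e4]
    | false =>
      simp only [List.takeWhile, List.dropWhile]
      show goA (b, false, max m c, 0) rest = goA (b, false, max m (c + 0), 0) (false :: rest)
      simp [goA, List.foldl, stepA]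

theorem goA_widths : ∀ (n : Nat) (flags : List Bool), flags.length ≤ n → ∀ (b m : Int),
    goA (b, false, m, 0) flags =
      (b + ((widthsOf flags).length : Int), (widthsOf flags).foldl max m) := by
  intro n
  induction n with
  | zero =>
    intro flags h b m
    have : flags = [] := List.length_eq_zero_iff.mp (Nat.le_zero.mp h)
    subst this; simp [goA, widthsOf, List.foldl]
  | succ n ih =>
    intro flags h b m
    cases flags with
    | nil => simp [goA, widthsOf, List.foldl]
    | cons f rest =>
      cases f with
      | false =>
        have : goA (b, false, m, 0) (false :: rest) = goA (b, false, m, 0) rest := by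
          simp [goA, List.foldl, stepA]
        rw [this, ih rest (by simpa using Nat.lt_succ_iff.mp (Nat.lt_of_lt_of_le (by simp) h)) b m]
        simp [widthsOf]
      | true =>
        have h1 : goA (b, false, m, 0) (true :: rest) = goA (b + 1, true, m, 1) rest := by
          simp [goA, List.foldl, stepA]
        rw [h1, goA_in_run rest (b + 1) m 1]
        rw [ih (rest.dropWhile (· == true))
          (Nat.le_trans (List.length_dropWhile_le _ _)
            (by simpa using Nat.lt_succ_iff.mp (Nat.lt_of_lt_of_le (by simp) h))) (b + 1)
          (max m (1 + ((rest.takeWhile (· == true)).length : Int)))]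
        simp only [widthsOf, List.length_cons, List.foldl_cons, Prod.mk.injEq]
        refine ⟨by push_cast; ring, trivial⟩

theorem widthsOf_pos : ∀ (flags : List Bool), ∀ w ∈ widthsOf flags, 1 ≤ w := by
  intro flags
  induction flags using widthsOf.induct with
  | case1 => simp [widthsOf]
  | case2 rest ih => simpa [widthsOf] using ih
  | case3 rest ih =>
    intro w hw
    simp only [widthsOf, List.mem_cons] at hw
    rcases hw with h | h
    · subst h; omega
    · exact ih w h

theorem foldl_max_zero (ws : List Int) (hpos : ∀ w ∈ ws, 1 ≤ w) :
    ws.foldl max 0 = (PySem.List.max? ws (fun x => x)).getD 0 := by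
  cases ws with
  | nil => simp [PySem.List.max?]
  | cons x t =>
    rw [PySem.List.max?_id_cons]
    have hx : max 0 x = x := by
      have := hpos x (by simp); omega
    simp [List.foldl, hx]

-- ===== VERDICT (by name: the statement is the Claim_ definition above) =====
theorem count_ic_bands_spec : Claim_equal_count_ic_bands := by
  intro records _ _
  unfold Spec_count_ic_bands
  rw [count_ic_bands_eq_goA,
      goA_widths (records.map icFlag).length (records.map icFlag) le_rfl 0 0]
  unfold count_ic_bands_alt
  rw [foldl_max_zero _ (widthsOf_pos _)]
  simp
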